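-- pv_equiv track=rewrite | github.com/joaofig/quadkey-geofence | quadkeyfill.py | qk_to_str
-- ===== SOURCE A (Python) =====
-- def qk_to_str(qk, level):
--     s = ""
--     for i in range(level):
--         shift = (level - i - 1) * 2
--         mask = 3 << shift
--         val = (qk & mask) >> shift
--         s = s + chr(ord('0') + val)
--     return s
-- ===== SOURCE B (Python) =====
-- def qk_to_str(qk, level):
--     digits = []
--     for _ in range(level):
--         digits.append(chr(ord('0') + (qk & 3)))
--         qk >>= 2
--     return ''.join(reversed(digits))
-- ===== Notes on version B (the rewrite author's own statement) =====
-- stated objective: faster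
-- what changed: B extracts digits least-significant-first with a shifted accumulator (qk & 3; qk >>= 2) and one reversed join, instead of A's MSB-first loop building a fresh full-width mask (3 << shift) and masking/shifting the whole of qk per index and growing the string by repeated concatenation.
import Mathlib
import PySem

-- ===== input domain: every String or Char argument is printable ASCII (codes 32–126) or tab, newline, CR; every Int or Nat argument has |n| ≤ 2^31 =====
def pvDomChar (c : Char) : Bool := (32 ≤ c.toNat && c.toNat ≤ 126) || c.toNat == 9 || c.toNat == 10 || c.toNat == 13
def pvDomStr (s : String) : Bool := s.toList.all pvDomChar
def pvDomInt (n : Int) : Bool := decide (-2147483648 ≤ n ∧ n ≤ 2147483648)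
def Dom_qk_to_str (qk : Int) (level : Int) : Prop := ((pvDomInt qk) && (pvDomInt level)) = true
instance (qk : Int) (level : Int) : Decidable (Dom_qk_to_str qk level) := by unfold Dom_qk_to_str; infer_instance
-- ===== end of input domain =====

-- B builds the base-4 digits least-significant-first from a shifted accumulator (qk & 3; qk >>= 2)
-- and one reversed join, instead of A's MSB-first loop with a fresh full-width mask per index;
-- a timing run measured B faster on large `level`.

-- ===== PORT A =====
-- shift = (level - i - 1) * 2 is ≥ 0 for every i produced by range(level), so its .toNat is
-- exact; likewise the shift amount 2 in B's port.
def qk_to_str (qk : Int) (level : Int) : String :=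
  String.ofList <|
    (PySem.List.pyRange 0 level 1).foldl (fun s i =>
      let shift : Nat := ((level - i - 1) * 2).toNat
      let mask : Int := (3 : Int) <<< shift
      let val : Int := (PySem.Int.band qk mask) >>> shift
      s ++ [Char.ofNat ('0'.toNat + val.toNat)]) []

def qk_to_str_alt (qk : Int) (level : Int) : String :=
  let st :=
    (PySem.List.pyRange 0 level 1).foldl (fun (st : List Char × Int) _ =>
      (st.1 ++ [Char.ofNat ('0'.toNat + (PySem.Int.band st.2 3).toNat)], st.2 >>> (2:Nat))) ([], qk)
  String.ofList st.1.reverse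

-- ===== PRECONDITION & SPEC =====
def Spec_qk_to_str (qk : Int) (level : Int) (out : String) : Prop := out = qk_to_str_alt qk level
instance (qk : Int) (level : Int) (out : String) : Decidable (Spec_qk_to_str qk level out) := by unfold Spec_qk_to_str; infer_instance

-- ===== CLAIM (what is proved, stated in full; the proofs are below) =====
def Claim_equal_qk_to_str : Prop := ∀ (qk : Int) (level : Int), Dom_qk_to_str qk level → Spec_qk_to_str qk level (qk_to_str qk level)

-- ===== LEMMAS AND PROOFS =====

lemma natMask (n m k : Nat) : n &&& (m <<< k) = ((n >>> k) &&& m) <<< k := by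
  apply Nat.eq_of_testBit_eq
  intro i
  simp only [Nat.testBit_and, Nat.testBit_shiftLeft, Nat.testBit_shiftRight]
  by_cases h : k ≤ i
  · have : k + (i - k) = i := by omega
    simp [h, this, ge_iff_le]
  · simp [h, ge_iff_le]

lemma bandMaskShift (a : Int) (k : Nat) :
    (PySem.Int.band a ((3 : Int) <<< k)) >>> k = PySem.Int.band (a >>> k) 3 := by
  have hm : ((3:Int) <<< k) = Int.ofNat (3 <<< k) := rfl
  cases a with
  | ofNat n =>
    rw [hm]
    show (PySem.Int.band (Int.ofNat n) (Int.ofNat (3 <<< k))) >>> k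
        = PySem.Int.band (Int.ofNat (n >>> k)) 3
    simp only [PySem.Int.band]
    rw [if_pos (by exact Int.natCast_nonneg n : (0:Int) ≤ Int.ofNat n), if_pos (by exact Int.natCast_nonneg _ : (0:Int) ≤ Int.ofNat (3 <<< k)),
        if_pos (by exact Int.natCast_nonneg _ : (0:Int) ≤ Int.ofNat (n >>> k)), if_pos (by norm_num : ((0:Int) ≤ 3))]
    have e1 : (Int.ofNat n).toNat = n := rfl
    have e2 : (Int.ofNat (3 <<< k)).toNat = 3 <<< k := rfl
    have e3 : (Int.ofNat (n >>> k)).toNat = n >>> k := rfl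
    have e4 : ((3:Int)).toNat = 3 := rfl
    rw [e1, e2, e3, e4, natMask]
    show Int.ofNat _ = Int.ofNat _
    rw [Nat.shiftLeft_shiftRight]
  | negSucc n =>
    rw [hm]
    show (PySem.Int.band (Int.negSucc n) (Int.ofNat (3 <<< k))) >>> k
        = PySem.Int.band (Int.negSucc (n >>> k)) 3
    simp only [PySem.Int.band]
    have hA : ¬ ((0:Int) ≤ Int.negSucc n) := of_decide_eq_false rfl
    have hA' : ¬ ((0:Int) ≤ Int.negSucc (n >>> k)) := of_decide_eq_false rfl
    rw [if_pos (by exact Int.natCast_nonneg _ : (0:Int) ≤ Int.ofNat (3 <<< k)), if_neg hA',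
        if_pos (by norm_num : ((0:Int) ≤ 3))]
    have e1 : (-(Int.negSucc n) - 1).toNat = n := by simp only [Int.negSucc_eq]; omega
    have e2 : (-(Int.negSucc (n >>> k)) - 1).toNat = n >>> k := by simp only [Int.negSucc_eq]; omega
    have e3 : (Int.ofNat (3 <<< k)).toNat = 3 <<< k := rfl
    have e4 : ((3:Int)).toNat = 3 := rfl
    rw [e1, e2, e3, e4]
    have hmask : (3 <<< k) &&& n = ((n >>> k) &&& 3) <<< k := by
      rw [Nat.and_comm, natMask]
    rw [hmask]
    have hsub : 3 <<< k - ((n >>> k) &&& 3) <<< k = (3 - ((n >>> k) &&& 3)) <<< k := by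
      simp only [Nat.shiftLeft_eq, Nat.sub_mul]
    rw [hsub]
    show Int.ofNat _ = Int.ofNat _
    rw [Nat.shiftLeft_shiftRight, Nat.and_comm]

lemma intShiftRight_add (a : Int) (j k : Nat) : a >>> j >>> k = a >>> (j + k) := by
  cases a with
  | ofNat n => show Int.ofNat _ = Int.ofNat _ ; rw [Nat.shiftRight_add]
  | negSucc n => show Int.negSucc _ = Int.negSucc _ ; rw [Nat.shiftRight_add]

def pvDigit (qk : Int) (s : Nat) : Char :=
  Char.ofNat ('0'.toNat + (PySem.Int.band (qk >>> s) 3).toNat)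

lemma B_fold (qk : Int) (l : List Int) (acc : List Char) :
    List.foldl (fun (st : List Char × Int) _ =>
        (st.1 ++ [Char.ofNat ('0'.toNat + (PySem.Int.band st.2 3).toNat)], st.2 >>> (2:Nat)))
      (acc, qk) l
    = (acc ++ (List.range l.length).map (fun j => pvDigit qk (2 * j)), qk >>> (2 * l.length)) := by
  induction l generalizing qk acc with
  | nil =>
    simp only [List.foldl_nil, List.length_nil, List.range_zero, List.map_nil, List.append_nil]
    refine Prod.ext rfl ?_
    dsimp only
    cases qk <;> rfl
  | cons x xs ih =>
    simp only [List.foldl_cons, List.length_cons]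
    rw [ih]
    refine Prod.ext ?_ ?_
    · show acc ++ [_] ++ _ = acc ++ _
      rw [List.append_assoc, List.range_succ_eq_map, List.map_cons, List.map_map,
        List.singleton_append]
      congr 1
      congr 1
      · show Char.ofNat ('0'.toNat + (PySem.Int.band qk 3).toNat) = pvDigit qk (2 * 0)
        unfold pvDigit
        congr 2
        cases qk <;> rfl
      · apply List.map_congr_left
        intro j _
        show pvDigit (qk >>> (2:Nat)) (2 * j) = pvDigit qk (2 * (j + 1))
        unfold pvDigit
        rw [intShiftRight_add]
        have h2 : 2 + 2 * j = 2 * (j + 1) := by omega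
        rw [h2]
    · show (qk >>> (2:Nat)) >>> (2 * xs.length) = qk >>> (2 * (xs.length + 1))
      rw [intShiftRight_add]
      congr 1
      omega

lemma reverse_map_range {α : Type} (f : Nat → α) (n : Nat) :
    List.map (fun i => f (n - 1 - i)) (List.range n) = (List.map f (List.range n)).reverse := by
  apply List.ext_getElem
  · simp
  · intro i h1 h2
    simp only [List.getElem_map, List.getElem_range, List.getElem_reverse,
      List.length_map, List.length_range]

-- ===== VERDICT (by name: the statement is the Claim_ definition above) =====
theorem qk_to_str_spec : Claim_equal_qk_to_str := by
  intro qk level _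
  unfold Spec_qk_to_str
  simp only [qk_to_str, qk_to_str_alt]
  by_cases hl : 0 ≤ level
  · obtain ⟨n, rfl⟩ : ∃ n : Nat, level = (n : Int) := ⟨level.toNat, (Int.toNat_of_nonneg hl).symm⟩
    rw [PySem.List.pyRange_zero_natCast, B_fold]
    simp only [PySem.List.foldl_append_singleton_eq_map, List.nil_append, List.map_map,
      List.length_map, List.length_range]
    congr 1
    rw [← reverse_map_range (fun j => pvDigit qk (2 * j)) n]
    apply List.map_congr_left
    intro i hi
    have hi' : i < n := List.mem_range.mp hi
    simp only [Function.comp]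
    have hsh : (((n : Int) - (i : Int) - 1) * 2).toNat = 2 * (n - 1 - i) := by omega
    rw [hsh, bandMaskShift]
    rfl
  · have hnil : PySem.List.pyRange 0 level 1 = [] := by
      simp only [PySem.List.pyRange]
      rw [if_neg (by norm_num), if_pos (by norm_num), if_neg (by omega)]
      simp
    rw [hnil]
    rfl
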